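-- pv_equiv track=rewrite | github.com/stdstring/PythonExamplesPorter | PortingResult/Utils/test_filter.py | process_portion
-- ===== SOURCE A (Python) =====
-- import typing
--
-- SKIPPED_ERROR = "NotImplementedError:"
--
-- class Portion(typing.NamedTuple):
--
--     Index: int
--     Data: typing.List[str]
--
-- def process_portion(lines: typing.List[str], index: int, skipped_error_reasons: typing.List[str]) -> Portion:
--     portion = []
--     skip_portion = False
--     while (index < len(lines)) and (len(lines[index]) > 0):
--         if lines[index].startswith(SKIPPED_ERROR):
--             skipped_error_reason = lines[index].removeprefix(SKIPPED_ERROR).strip()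
--             skipped_error_reasons.append(skipped_error_reason)
--             skip_portion = True
--         portion.append(lines[index])
--         index += 1
--     return Portion(index, [] if skip_portion else portion)
-- ===== SOURCE B (Python) =====
-- import typing
--
-- SKIPPED_ERROR = "NotImplementedError:"
--
-- class Portion(typing.NamedTuple):
--
--     Index: int
--     Data: typing.List[str]
--
-- def _scan(lines: typing.List[str], i: int, reasons: typing.List[str]):
--     """Recurse from position i; return (end_index, data), where data is None
--     when a skip marker occurs anywhere in the rest of the block."""
--     if i >= len(lines) or len(lines[i]) == 0:
--         return i, []
--     line = lines[i]
--     skip_here = line.startswith(SKIPPED_ERROR)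
--     if skip_here:
--         reasons.append(line.removeprefix(SKIPPED_ERROR).strip())
--     end, tail = _scan(lines, i + 1, reasons)
--     if skip_here or tail is None:
--         return end, None
--     return end, [line] + tail
--
-- def process_portion(lines: typing.List[str], index: int, skipped_error_reasons: typing.List[str]) -> Portion:
--     end, data = _scan(lines, index, skipped_error_reasons)
--     return Portion(end, [] if data is None else data)
-- ===== Notes on version B (the rewrite author's own statement) =====
-- stated objective: alternative
-- what changed: A's single iterative while-loop with mutable accumulators (portion list + skip flag, output assembled at the end) is replaced by a recursive scan that builds the block back-to-front on the way out of the recursion, using a None sentinel propagated up instead of a boolean flag to discard skipped blocks.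
import Mathlib
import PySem

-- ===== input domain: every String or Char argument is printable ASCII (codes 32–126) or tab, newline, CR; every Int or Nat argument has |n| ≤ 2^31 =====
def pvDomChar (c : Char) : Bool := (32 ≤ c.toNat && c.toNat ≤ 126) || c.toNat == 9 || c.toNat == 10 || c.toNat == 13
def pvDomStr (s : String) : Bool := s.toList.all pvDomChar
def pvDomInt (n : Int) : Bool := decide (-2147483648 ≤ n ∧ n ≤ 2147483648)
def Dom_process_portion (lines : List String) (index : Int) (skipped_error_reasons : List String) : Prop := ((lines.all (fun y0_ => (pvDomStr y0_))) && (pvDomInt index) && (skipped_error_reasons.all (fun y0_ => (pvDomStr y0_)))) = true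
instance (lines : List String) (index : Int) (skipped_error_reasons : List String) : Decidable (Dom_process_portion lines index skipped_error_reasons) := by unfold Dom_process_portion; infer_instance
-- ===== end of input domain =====

-- B replaces A's iterative flag-and-accumulator loop by a recursive scan building the block
-- back-to-front with a None sentinel for skipped blocks; equivalence is about the RETURN value
-- only — both Pythons also append stripped reason strings to `skipped_error_reasons` in place
-- (in the same order), a side effect not modelled in these ports.

-- ===== PORT A =====
def pvSkipPrefix : String := "NotImplementedError:"   -- SKIPPED_ERROR

-- A's while-loop; state = (index, portion, skip_portion).  The fuel argument only makes the loop
-- structurally recursive: callers pass fuel with len(lines) ≤ index + fuel, and the body runs only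
-- while index < len(lines), so the fuel-0 exit is the loop's own exit.
def pvGoA (lines : List String) : Nat → Int → List String → Bool → Int × List String
  | 0, index, portion, skip => (index, if skip then [] else portion)
  | fuel+1, index, portion, skip =>
    if index < (lines.length : Int) then
      match PySem.List.pyGet? lines index with
      | none => (index, if skip then [] else portion)   -- lines[index] raises IndexError: excluded by Pre_
      | some s =>
        if PySem.Str.len s > 0 then
          pvGoA lines fuel (index + 1) (portion ++ [s])
            (if PySem.Str.startswith s pvSkipPrefix then true else skip)
        else (index, if skip then [] else portion)
    else (index, if skip then [] else portion)

def process_portion (lines : List String) (index : Int) (skipped_error_reasons : List String) : Int × List String :=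
  pvGoA lines ((lines.length : Int) - index).toNat index [] false

-- ===== PORT B =====
-- B's recursive helper _scan; returns (end_index, data) with data = none when a skip marker occurs.
-- Fuel makes the recursion structural, exactly as for A's loop.
def pvScanB (lines : List String) : Nat → Int → Int × Option (List String)
  | 0, i => (i, some [])
  | fuel+1, i =>
    if i < (lines.length : Int) then
      match PySem.List.pyGet? lines i with
      | none => (i, some [])   -- lines[i] raises IndexError: excluded by Pre_
      | some line =>
        if PySem.Str.len line > 0 then
          let skip_here := PySem.Str.startswith line pvSkipPrefix
          let r := pvScanB lines fuel (i + 1)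
          if skip_here then (r.1, none)
          else
            match r.2 with
            | none => (r.1, none)
            | some tail => (r.1, some (line :: tail))
        else (i, some [])
    else (i, some [])

def process_portion_alt (lines : List String) (index : Int) (skipped_error_reasons : List String) : Int × List String :=
  let r := pvScanB lines ((lines.length : Int) - index).toNat index
  (r.1, match r.2 with | none => [] | some data => data)

-- ===== PRECONDITION & SPEC =====
-- Pre_ excludes exactly the inputs on which both Pythons raise IndexError: for index < -len(lines)
-- the first element access lines[index] is out of range.
def Pre_process_portion (lines : List String) (index : Int) (skipped_error_reasons : List String) : Prop :=
  -(lines.length : Int) ≤ index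

instance (lines : List String) (index : Int) (skipped_error_reasons : List String) : Decidable (Pre_process_portion lines index skipped_error_reasons) := by unfold Pre_process_portion; infer_instance

def pvWitness_process_portion : List String × Int × List String := (["a", "NotImplementedError: x", "", "b"], 0, [])

def Spec_process_portion (lines : List String) (index : Int) (skipped_error_reasons : List String) (out : Int × List String) : Prop := out = process_portion_alt lines index skipped_error_reasons
instance (lines : List String) (index : Int) (skipped_error_reasons : List String) (out : Int × List String) : Decidable (Spec_process_portion lines index skipped_error_reasons out) := by unfold Spec_process_portion; infer_instance

-- ===== CLAIM (what is proved, stated in full; the proofs are below) =====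
def Claim_equal_process_portion : Prop := ∀ (lines : List String) (index : Int) (skipped_error_reasons : List String), Dom_process_portion lines index skipped_error_reasons → Pre_process_portion lines index skipped_error_reasons → Spec_process_portion lines index skipped_error_reasons (process_portion lines index skipped_error_reasons)

-- ===== LEMMAS AND PROOFS =====

-- A's loop state relates to B's recursion: the flag/accumulator pair of A is the sentinel option
-- of B, read through this match.
lemma pvAB (lines : List String) : ∀ (fuel : Nat) (i : Int) (portion : List String) (skip : Bool),
    pvGoA lines fuel i portion skip =
      ((pvScanB lines fuel i).1,
        match skip, (pvScanB lines fuel i).2 with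
        | true, _ => []
        | false, none => []
        | false, some t => portion ++ t) := by
  intro fuel
  induction fuel with
  | zero =>
    intro i portion skip
    cases skip <;> simp [pvGoA, pvScanB]
  | succ fuel ih =>
    intro i portion skip
    simp only [pvGoA, pvScanB]
    by_cases hlt : i < (lines.length : Int)
    · rw [if_pos hlt, if_pos hlt]
      cases hg : PySem.List.pyGet? lines i with
      | none => cases skip <;> simp
      | some s =>
        dsimp only
        by_cases hs : PySem.Str.len s > 0
        · rw [if_pos hs, if_pos hs]
          rw [ih (i + 1) (portion ++ [s]) (if PySem.Str.startswith s pvSkipPrefix then true else skip)]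
          cases hw : PySem.Str.startswith s pvSkipPrefix <;>
            cases skip <;>
              cases ht : (pvScanB lines fuel (i + 1)).2 <;> simp
        · rw [if_neg hs, if_neg hs]
          cases skip <;> simp
    · rw [if_neg hlt, if_neg hlt]
      cases skip <;> simp

-- ===== VERDICT (by name: the statement is the Claim_ definition above) =====
theorem process_portion_spec : Claim_equal_process_portion := by
  unfold Claim_equal_process_portion
  intro lines index reasons _ _
  unfold Spec_process_portion process_portion process_portion_alt
  rw [pvAB lines ((lines.length : Int) - index).toNat index [] false]
  cases h : (pvScanB lines ((lines.length : Int) - index).toNat index).2 <;> simp [h]
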